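-- pv_equiv track=rewrite | github.com/jaehho/mount_sinai | ellipse.py | group_values_without_newlines
-- ===== SOURCE A (Python) =====
-- def find_common_prefix(str1, str2):
--     """Find the longest common prefix between two strings."""
--     i = 0
--     while i < min(len(str1), len(str2)) and str1[i] == str2[i]:
--         i += 1
--     return str1[:i]
--
-- def group_values_without_newlines(values):
--     values_list = values.split(",")
--     grouped_values = []
--     current_group = [values_list[0]]
--     current_prefix = values_list[0]
--
--     for value in values_list[1:]:
--         common_prefix = find_common_prefix(current_prefix, value)
--         if common_prefix and len(common_prefix) > 0:
--             current_group.append(value)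
--             current_prefix = common_prefix
--         else:
--             # Join the current group's values, append ellipsis for a new group, and start a new group
--             grouped_values.append(",".join(current_group) + "\n...")
--             current_group = [value]
--             current_prefix = value
--     # Add the last group without an ellipsis at the end
--     grouped_values.append(",".join(current_group))
--
--     return "\n".join(grouped_values)
-- ===== SOURCE B (Python) =====
-- def group_values_without_newlines(values):
--     # Group adjacent values that share a first character (empty values stand alone),
--     # then join the groups with the ellipsis separator in one go.
--     vs = values.split(",")
--     groups = [[vs[0]]]
--     for prev, cur in zip(vs, vs[1:]):
--         if cur[:1] and cur[:1] == prev[:1]: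
--             groups[-1].append(cur)
--         else:
--             groups.append([cur])
--     return "\n...\n".join(",".join(g) for g in groups)
-- ===== Notes on version B (the rewrite author's own statement) =====
-- stated objective: simpler
-- what changed: Replaced the running common-prefix computation (find_common_prefix helper and prefix state) with a single adjacent-pair scan grouping values by first character, and replaced per-group ellipsis suffixing with one join over the groups using the ellipsis separator.
import Mathlib
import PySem

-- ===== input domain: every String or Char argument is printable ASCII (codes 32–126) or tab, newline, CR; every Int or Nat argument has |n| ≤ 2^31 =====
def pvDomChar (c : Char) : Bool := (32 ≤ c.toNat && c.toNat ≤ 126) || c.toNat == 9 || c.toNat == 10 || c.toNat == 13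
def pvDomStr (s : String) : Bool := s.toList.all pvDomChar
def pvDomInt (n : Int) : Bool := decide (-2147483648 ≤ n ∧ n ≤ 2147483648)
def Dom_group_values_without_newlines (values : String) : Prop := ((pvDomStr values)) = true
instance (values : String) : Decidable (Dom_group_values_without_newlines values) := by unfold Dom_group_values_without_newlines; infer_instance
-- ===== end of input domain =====

-- B replaces A's running common-prefix state (find_common_prefix helper) with an
-- adjacent-pair first-character scan and a single '\n...\n' join (objective: simpler).

-- ===== PORT A =====
-- find_common_prefix: the while loop as structural recursion over both strings
def pvFcp : List Char → List Char → List Char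
  | a :: t1, b :: t2 => if a = b then a :: pvFcp t1 t2 else []
  | _, _ => []

-- one iteration of A's for loop; state = (grouped_values, current_group, current_prefix)
def pvStepA (st : List String × List String × String) (value : String) :
    List String × List String × String :=
  let cpfx : String := String.ofList (pvFcp st.2.2.toList value.toList)
  if cpfx ≠ "" ∧ 0 < PySem.Str.len cpfx then
    (st.1, st.2.1 ++ [value], cpfx)
  else
    (st.1 ++ [PySem.Str.join "," st.2.1 ++ "\n..."], [value], value)

def group_values_without_newlines (values : String) : String :=
  match PySem.Str.split? values "," with
  | none => ""            -- unreachable: the separator "," is non-empty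
  | some [] => ""         -- unreachable: str.split always yields at least one piece
  | some (v0 :: rest) =>
    let st := rest.foldl pvStepA ([], [v0], v0)
    PySem.Str.join "\n" (st.1 ++ [PySem.Str.join "," st.2.1])

-- ===== PORT B =====
-- one iteration of B's loop over zip(vs, vs[1:]); state = (closed groups, groups[-1])
def pvStepB (st : List (List String) × List String) (pc : String × String) :
    List (List String) × List String :=
  if PySem.Str.slice pc.2 none (some 1) ≠ "" ∧
      PySem.Str.slice pc.2 none (some 1) = PySem.Str.slice pc.1 none (some 1) then
    (st.1, st.2 ++ [pc.2])
  else
    (st.1 ++ [st.2], [pc.2])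

def group_values_without_newlines_alt (values : String) : String :=
  match PySem.Str.split? values "," with
  | none => ""            -- unreachable: the separator "," is non-empty
  | some [] => ""         -- unreachable: str.split always yields at least one piece
  | some (v0 :: rest) =>
    let st := (List.zip (v0 :: rest) rest).foldl pvStepB ([], [v0])
    PySem.Str.join "\n...\n" ((st.1 ++ [st.2]).map (PySem.Str.join ","))

-- ===== PRECONDITION & SPEC =====
def Spec_group_values_without_newlines (values : String) (out : String) : Prop := out = group_values_without_newlines_alt values
instance (values : String) (out : String) : Decidable (Spec_group_values_without_newlines values out) := by unfold Spec_group_values_without_newlines; infer_instance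

-- ===== CLAIM (what is proved, stated in full; the proofs are below) =====
def Claim_equal_group_values_without_newlines : Prop := ∀ (values : String), Dom_group_values_without_newlines values → Spec_group_values_without_newlines values (group_values_without_newlines values)

-- ===== LEMMAS AND PROOFS =====

-- the closed-group string A stores for a group g
def pvClose (g : List String) : String := PySem.Str.join "," g ++ "\n..."

lemma pvFcp_ne_nil (l1 l2 : List Char) :
    pvFcp l1 l2 ≠ [] ↔ (l2.take 1 ≠ [] ∧ l2.take 1 = l1.take 1) := by
  cases l1 with
  | nil => simp [pvFcp]
  | cons a t1 =>
    cases l2 with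
    | nil => simp [pvFcp]
    | cons b t2 =>
      by_cases h : a = b
      · simp [pvFcp, h]
      · simp [pvFcp, h]
        exact fun hba => h hba.symm

lemma pvFcp_take1 (l1 l2 : List Char) (h : pvFcp l1 l2 ≠ []) :
    (pvFcp l1 l2).take 1 = l2.take 1 := by
  cases l1 with
  | nil => simp [pvFcp] at h
  | cons a t1 =>
    cases l2 with
    | nil => simp [pvFcp] at h
    | cons b t2 =>
      by_cases hab : a = b
      · simp [pvFcp, hab]
      · simp [pvFcp, hab] at h

lemma slice1_list (l : List Char) :
    PySem.List.slice l none (some 1) = l.take 1 := by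
  rw [PySem.List.slice_to] <;> norm_num

lemma ne_empty_iff (s : String) : (s ≠ "") ↔ s.toList ≠ [] :=
  not_congr (String.toList_eq_nil_iff).symm

-- both loop conditions say "value is non-empty and shares its first char with prev"
lemma cond_iff (cp prev v : String) (hinv : cp.toList.take 1 = prev.toList.take 1) :
    ((String.ofList (pvFcp cp.toList v.toList) ≠ "") ∧
        0 < PySem.Str.len (String.ofList (pvFcp cp.toList v.toList))) ↔
    (PySem.Str.slice v none (some 1) ≠ "" ∧
      PySem.Str.slice v none (some 1) = PySem.Str.slice prev none (some 1)) := by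
  have hA : ((String.ofList (pvFcp cp.toList v.toList) ≠ "") ∧
        0 < PySem.Str.len (String.ofList (pvFcp cp.toList v.toList))) ↔
      pvFcp cp.toList v.toList ≠ [] := by
    rw [ne_empty_iff]
    constructor
    · intro h
      simpa using h.1
    · intro h
      refine ⟨by simpa using h, ?_⟩
      have hlen : PySem.Str.len (String.ofList (pvFcp cp.toList v.toList)) =
          ((pvFcp cp.toList v.toList).length : Int) := by simp [pysem]
      rw [hlen]
      exact_mod_cast List.length_pos_iff.mpr h
  have e1 : (PySem.Str.slice v none (some 1)).toList = v.toList.take 1 := by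
    simp [PySem.Str.slice, slice1_list]
  have e2 : (PySem.Str.slice prev none (some 1)).toList = prev.toList.take 1 := by
    simp [PySem.Str.slice, slice1_list]
  have hB : (PySem.Str.slice v none (some 1) ≠ "" ∧
      PySem.Str.slice v none (some 1) = PySem.Str.slice prev none (some 1)) ↔
      (v.toList.take 1 ≠ [] ∧ v.toList.take 1 = prev.toList.take 1) := by
    rw [ne_empty_iff, ← String.toList_inj, e1, e2]
  rw [hA, hB, pvFcp_ne_nil, hinv]

-- the per-group '\n...' suffix plus '\n' join equals one '\n...\n' join (char level)
lemma chars_join_ellipsis (ds : List (List Char)) (x : List Char) :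
    PySem.Chars.join ['\n'] (ds.map (· ++ ['\n','.','.','.']) ++ [x]) =
    PySem.Chars.join ['\n','.','.','.','\n'] (ds ++ [x]) := by
  induction ds with
  | nil => simp [PySem.Chars.join_singleton]
  | cons d ds ih =>
    cases ds with
    | nil =>
      simp [PySem.Chars.join_cons_cons, PySem.Chars.join_singleton, List.append_assoc]
    | cons d2 ds2 =>
      simp only [List.map_cons, List.cons_append, PySem.Chars.join_cons_cons] at ih ⊢
      rw [ih]
      simp [List.append_assoc]

-- string-level version of the join identity
lemma join_ellipsis (ds : List String) (x : String) :
    PySem.Str.join "\n" (ds.map (· ++ "\n...") ++ [x]) =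
    PySem.Str.join "\n...\n" (ds ++ [x]) := by
  rw [← String.toList_inj]
  simp only [PySem.Str.join, String.toList_ofList]
  have h1 : List.map String.toList (ds.map (· ++ "\n...") ++ [x]) =
      (ds.map String.toList).map (· ++ ['\n','.','.','.']) ++ [x.toList] := by
    simp [List.map_map, Function.comp]
  have h2 : List.map String.toList (ds ++ [x]) = ds.map String.toList ++ [x.toList] := by
    simp
  rw [h1, h2]
  have hs1 : ("\n" : String).toList = ['\n'] := by decide
  have hs2 : ("\n...\n" : String).toList = ['\n','.','.','.','\n'] := by decide
  rw [hs1, hs2, chars_join_ellipsis]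

-- the two loops keep matching states: A's grouped list is B's closed groups (closed),
-- A's current group is B's last group, and A's prefix agrees with prev on first char
lemma loop_eq (rest : List String) :
    ∀ (prev cp : String) (done : List (List String)) (cur : List String),
      cp.toList.take 1 = prev.toList.take 1 →
      (rest.foldl pvStepA (done.map pvClose, cur, cp)).1 =
        ((List.zip (prev :: rest) rest).foldl pvStepB (done, cur)).1.map pvClose ∧
      (rest.foldl pvStepA (done.map pvClose, cur, cp)).2.1 =
        ((List.zip (prev :: rest) rest).foldl pvStepB (done, cur)).2 := by
  induction rest with
  | nil => intro prev cp done cur _; exact ⟨rfl, rfl⟩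
  | cons r rest ih =>
    intro prev cp done cur hinv
    simp only [List.zip_cons_cons, List.foldl_cons]
    by_cases hc : (PySem.Str.slice r none (some 1) ≠ "" ∧
        PySem.Str.slice r none (some 1) = PySem.Str.slice prev none (some 1))
    · have ha := (cond_iff cp prev r hinv).mpr hc
      have hstA : pvStepA (done.map pvClose, cur, cp) r =
          (done.map pvClose, cur ++ [r], String.ofList (pvFcp cp.toList r.toList)) := by
        simp only [pvStepA]
        rw [if_pos ha]
      have hstB : pvStepB (done, cur) (prev, r) = (done, cur ++ [r]) := by
        simp only [pvStepB]
        rw [if_pos hc]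
      rw [hstA, hstB]
      apply ih
      have hne : pvFcp cp.toList r.toList ≠ [] := by
        intro hnil
        exact ha.1 (by simp [hnil])
      simpa using pvFcp_take1 cp.toList r.toList hne
    · have ha : ¬ ((String.ofList (pvFcp cp.toList r.toList) ≠ "") ∧
          0 < PySem.Str.len (String.ofList (pvFcp cp.toList r.toList))) :=
        fun h => hc ((cond_iff cp prev r hinv).mp h)
      have hstA : pvStepA (done.map pvClose, cur, cp) r =
          ((done ++ [cur]).map pvClose, [r], r) := by
        simp only [pvStepA]
        rw [if_neg ha]
        simp [pvClose]
      have hstB : pvStepB (done, cur) (prev, r) = (done ++ [cur], [r]) := by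
        simp only [pvStepB]
        rw [if_neg hc]
      rw [hstA, hstB]
      exact ih r r (done ++ [cur]) [r] rfl

-- ===== VERDICT (by name: the statement is the Claim_ definition above) =====
theorem group_values_without_newlines_spec : Claim_equal_group_values_without_newlines := by
  intro values _
  unfold Spec_group_values_without_newlines
  unfold group_values_without_newlines group_values_without_newlines_alt
  cases h : PySem.Str.split? values "," with
  | none => rfl
  | some vs =>
    cases vs with
    | nil => rfl
    | cons v0 rest =>
      simp only
      have hmain := loop_eq rest v0 v0 [] [v0] rfl
      simp only [List.map_nil] at hmain
      rw [hmain.1, hmain.2]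
      rw [show ((List.zip (v0 :: rest) rest).foldl pvStepB ([], [v0])).1.map pvClose =
          (((List.zip (v0 :: rest) rest).foldl pvStepB ([], [v0])).1.map
            (PySem.Str.join ",")).map (· ++ "\n...") by
        simp [List.map_map, pvClose, Function.comp]]
      rw [join_ellipsis]
      simp
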